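-- pv_equiv track=rewrite | github.com/ivanwakeup/algorithms | algorithms/prep/microsoft/lexicographically_smallest_Str.py | lexicograph
-- ===== SOURCE A (Python) =====
-- def lexicograph(s):
--     arr = list(s)
--     result = []
--     removed=False
--     for item in arr:
--         if result and ord(result[-1]) >= ord(item) and not removed:
--             result.pop()
--             removed=True
--         result.append(item)
--     return "".join(result)
-- ===== SOURCE B (Python) =====
-- def lexicograph(s):
--     for i in range(len(s) - 1):
--         if s[i] >= s[i + 1]:
--             return s[:i] + s[i + 1:]
--     return s
-- ===== Notes on version B (the rewrite author's own statement) =====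
-- stated objective: faster
-- what changed: B finds the first index i with s[i] >= s[i+1] and returns s[:i] + s[i+1:] as one splice, instead of A's character-by-character rebuild with a pop and a one-shot flag.
import Mathlib
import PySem

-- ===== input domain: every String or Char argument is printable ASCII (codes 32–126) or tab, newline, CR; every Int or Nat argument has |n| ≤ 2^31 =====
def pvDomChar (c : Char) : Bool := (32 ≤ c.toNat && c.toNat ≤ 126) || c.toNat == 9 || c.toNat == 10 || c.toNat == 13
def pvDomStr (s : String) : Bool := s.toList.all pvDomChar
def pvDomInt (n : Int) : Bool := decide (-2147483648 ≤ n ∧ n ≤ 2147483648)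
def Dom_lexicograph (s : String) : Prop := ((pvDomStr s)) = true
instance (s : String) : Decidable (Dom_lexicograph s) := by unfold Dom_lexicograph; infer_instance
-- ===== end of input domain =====

-- B finds the single cut point (first i with s[i] >= s[i+1]) and splices once: simpler than A's rebuild with pop and a removed flag.

-- ===== PORT A =====
-- one loop step of A: maybe pop the last char (once), then append the current char
def lexStepA (st : List Char × Bool) (item : Char) : List Char × Bool :=
  if (st.1.getLast?.elim false fun last => decide (last.toNat ≥ item.toNat)) && !st.2 then
    (st.1.dropLast ++ [item], true)
  else
    (st.1 ++ [item], st.2)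

def lexicograph (s : String) : String :=
  let arr := s.toList
  String.mk (arr.foldl lexStepA ([], false)).1

-- ===== PORT B =====
-- the 'for i in range(len(s)-1)' loop of Source B, with early return at the first cut point
def lexLoopB (l : List Char) (i : Nat) : List Char :=
  if h : i + 1 < l.length then
    if (l[i]'(by omega)).toNat ≥ (l[i + 1]'h).toNat then
      l.take i ++ l.drop (i + 1)
    else
      lexLoopB l (i + 1)
  else
    l
termination_by l.length - i

def lexicograph_alt (s : String) : String :=
  String.mk (lexLoopB s.toList 0)

-- ===== PRECONDITION & SPEC =====
def Spec_lexicograph (s : String) (out : String) : Prop := out = lexicograph_alt s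
instance (s : String) (out : String) : Decidable (Spec_lexicograph s out) := by unfold Spec_lexicograph; infer_instance

-- ===== CLAIM (what is proved, stated in full; the proofs are below) =====
def Claim_equal_lexicograph : Prop := ∀ (s : String), Dom_lexicograph s → Spec_lexicograph s (lexicograph s)

-- ===== LEMMAS AND PROOFS =====

-- common specification: drop the first element of the first non-increasing adjacent pair
def lexCut : List Char → List Char
  | [] => []
  | [a] => [a]
  | a :: b :: rest =>
    if a.toNat ≥ b.toNat then b :: rest else a :: lexCut (b :: rest)

-- A's fold, once removed, just appends the rest
theorem lexFoldA_removed (l res : List Char) :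
    l.foldl lexStepA (res, true) = (res ++ l, true) := by
  induction l generalizing res with
  | nil => simp
  | cons c l ih =>
      simp only [List.foldl_cons, lexStepA, Bool.not_true, Bool.and_false,
        Bool.false_eq_true, if_false]
      rw [ih]; simp

-- A's fold in the not-yet-removed phase computes lexCut
theorem lexFoldA_cut (l res : List Char) (a : Char) :
    (l.foldl lexStepA (res ++ [a], false)).1 = res ++ lexCut (a :: l) := by
  induction l generalizing res a with
  | nil => simp [lexCut]
  | cons b l ih =>
      simp only [List.foldl_cons, lexStepA, List.getLast?_concat, Option.elim,
        List.dropLast_concat, Bool.not_false, Bool.and_true]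
      by_cases hab : a.toNat ≥ b.toNat
      · rw [if_pos (by simpa using hab)]
        rw [lexFoldA_removed]
        simp [lexCut, hab]
      · rw [if_neg (by simpa using hab)]
        have := ih (res ++ [a]) b
        simp only [List.append_assoc] at this ⊢
        rw [this]
        simp [lexCut, hab]

-- B's index loop commutes with cons
theorem lexLoopB_cons (l : List Char) (a : Char) (i : Nat) :
    lexLoopB (a :: l) (i + 1) = a :: lexLoopB l i := by
  fun_induction lexLoopB l i with
  | case1 i h hcmp =>
      rw [lexLoopB]
      simp only [List.length_cons]
      rw [dif_pos (by omega)]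
      simp only [List.getElem_cons_succ]
      rw [if_pos hcmp]
      simp [List.take_succ_cons, List.drop_succ_cons]
  | case2 i h hcmp ih =>
      rw [lexLoopB]
      simp only [List.length_cons]
      rw [dif_pos (by omega)]
      simp only [List.getElem_cons_succ]
      rw [if_neg hcmp]
      exact ih
  | case3 i h =>
      rw [lexLoopB,
        dif_neg (show ¬ i + 1 + 1 < (a :: l).length by simp only [List.length_cons]; omega)]

-- B's loop from index 0 computes lexCut
theorem lexLoopB_cut (l : List Char) : lexLoopB l 0 = lexCut l := by
  induction l with
  | nil => rw [lexLoopB]; simp [lexCut]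
  | cons a l ih =>
      cases l with
      | nil => rw [lexLoopB]; simp [lexCut]
      | cons b rest =>
          rw [lexLoopB]
          rw [dif_pos (by simp)]
          simp only [List.getElem_cons_zero, List.getElem_cons_succ]
          by_cases hab : a.toNat ≥ b.toNat
          · rw [if_pos hab]; simp [lexCut, hab]
          · rw [if_neg hab, lexLoopB_cons, ih]
            simp [lexCut, hab]

-- ===== VERDICT (by name: the statement is the Claim_ definition above) =====
theorem lexicograph_spec : Claim_equal_lexicograph := by
  intro s _
  unfold Spec_lexicograph lexicograph lexicograph_alt
  rw [lexLoopB_cut]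
  cases h : s.toList with
  | nil => simp [lexCut]
  | cons a l =>
      have h1 : lexStepA ([], false) a = ([a], false) := by simp [lexStepA]
      have h2 := lexFoldA_cut l [] a
      simp only [List.nil_append] at h2
      simp only [List.foldl_cons, h1, h2]
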